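-- pv_equiv track=rewrite | github.com/Oded-Ben-Yair/hey-seven | src/agent/dispatch.py | _keyword_dispatch
-- ===== SOURCE A (Python) =====
-- from types import MappingProxyType as _MappingProxy
--
-- _CATEGORY_TO_AGENT: dict[str, str] = _MappingProxy({
--     "restaurants": "dining",
--     "entertainment": "entertainment",
--     "spa": "entertainment",
--     "gaming": "comp",
--     "promotions": "comp",
--     "hotel": "hotel",
-- })
--
-- _CATEGORY_PRIORITY: dict[str, int] = _MappingProxy({
--     "restaurants": 4,
--     "hotel": 3,
--     "entertainment": 2,
--     "spa": 2,
--     "gaming": 1,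
--     "promotions": 1,
-- })
--
-- def _keyword_dispatch(retrieved: list[dict]) -> str:
--     """Determine specialist agent name from retrieved context via keyword counting.
--
--     This is the deterministic fallback used when structured LLM dispatch
--     is unavailable (circuit breaker open, LLM failure, parsing error).
--
--     Returns:
--         Agent name from ``_CATEGORY_TO_AGENT`` or ``"host"`` for unmapped categories.
--     """
--     category_counts: dict[str, int] = {}
--     for chunk in retrieved:
--         cat = chunk.get("metadata", {}).get("category", "")
--         if cat:
--             category_counts[cat] = category_counts.get(cat, 0) + 1
--
--     if not category_counts:
--         return "host"
--
--     # Tie-break: business priority (dining > hotel > entertainment > comp),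
--     # then alphabetical for categories not in _CATEGORY_PRIORITY.
--     dominant = max(
--         category_counts,
--         key=lambda k: (category_counts[k], _CATEGORY_PRIORITY.get(k, 0), k),
--     )
--     return _CATEGORY_TO_AGENT.get(dominant, "host")
-- ===== SOURCE B (Python) =====
-- _CATEGORY_TO_AGENT: dict[str, str] = {
--     "restaurants": "dining",
--     "entertainment": "entertainment",
--     "spa": "entertainment",
--     "gaming": "comp",
--     "promotions": "comp",
--     "hotel": "hotel",
-- }
--
-- _CATEGORY_PRIORITY: dict[str, int] = {
--     "restaurants": 4,
--     "hotel": 3,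
--     "entertainment": 2,
--     "spa": 2,
--     "gaming": 1,
--     "promotions": 1,
-- }
--
-- def _keyword_dispatch(retrieved: list[dict]) -> str:
--     """Sort-then-scan variant: no counting dict at all.  Sort the category
--     names, so equal categories are adjacent, then sweep once over the runs,
--     keeping the run with the best (length, priority, name) key.  Correct
--     because a run's length in the sorted list is that category's count."""
--     cats = sorted(c for c in
--                   (chunk.get("metadata", {}).get("category", "") for chunk in retrieved)
--                   if c)
--     if not cats:
--         return "host"
--     best = None
--     best_key = (0, 0, "")
--     i, n = 0, len(cats)
--     while i < n:
--         j = i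
--         while j < n and cats[j] == cats[i]:
--             j += 1
--         key = (j - i, _CATEGORY_PRIORITY.get(cats[i], 0), cats[i])
--         if key > best_key:
--             best_key, best = key, cats[i]
--         i = j
--     return _CATEGORY_TO_AGENT.get(best, "host")
-- ===== Notes on version B (the rewrite author's own statement) =====
-- stated objective: alternative
-- what changed: A counts categories into a dict and takes one max over keys with a (count, priority, name) tuple key; B builds no dict at all: it sorts the category names so equal ones are adjacent and sweeps the runs once, keeping the run with the best (run-length, priority, name) key.
import Mathlib
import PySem

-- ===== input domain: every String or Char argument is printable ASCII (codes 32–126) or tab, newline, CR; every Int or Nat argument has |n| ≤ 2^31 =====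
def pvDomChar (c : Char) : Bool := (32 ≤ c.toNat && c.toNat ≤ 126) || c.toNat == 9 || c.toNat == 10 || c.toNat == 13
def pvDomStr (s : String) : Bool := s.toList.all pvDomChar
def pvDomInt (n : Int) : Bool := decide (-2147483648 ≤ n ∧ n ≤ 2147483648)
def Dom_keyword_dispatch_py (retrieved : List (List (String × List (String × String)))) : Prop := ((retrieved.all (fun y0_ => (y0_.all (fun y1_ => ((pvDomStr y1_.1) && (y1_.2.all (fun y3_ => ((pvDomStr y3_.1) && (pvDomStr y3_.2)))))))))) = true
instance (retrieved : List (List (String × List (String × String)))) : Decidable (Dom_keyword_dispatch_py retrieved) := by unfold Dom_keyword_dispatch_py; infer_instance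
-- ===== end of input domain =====

-- B replaces A's counting dict + single lexicographic max entirely: it sorts the category
-- names (equal names become adjacent) and sweeps the runs once, keeping the run with the
-- best (run-length, priority, name) key; same result, objective: alternative.
-- Python tuple keys are ported with Lex (Python's tuple order); strings are compared as
-- their character lists (exact: Python compares strings by code points).

-- module-level constants shared by both Pythons
def pvCatToAgent : PySem.Dict String String := PySem.Dict.ofList
  [("restaurants", "dining"), ("entertainment", "entertainment"), ("spa", "entertainment"),
   ("gaming", "comp"), ("promotions", "comp"), ("hotel", "hotel")]
def pvCatPriority : PySem.Dict String Int := PySem.Dict.ofList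
  [("restaurants", 4), ("hotel", 3), ("entertainment", 2), ("spa", 2), ("gaming", 1), ("promotions", 1)]

-- ===== PORT A =====
-- cat = chunk.get("metadata", {}).get("category", "")
def pvCatA (chunk : List (String × List (String × String))) : String :=
  (PySem.Dict.mk ((PySem.Dict.mk chunk).getD "metadata" [])).getD "category" ""

-- the counting loop of A
def pvCountsA (retrieved : List (List (String × List (String × String)))) : PySem.Dict String Int :=
  retrieved.foldl
    (fun d chunk => if pvCatA chunk ≠ "" then d.insert (pvCatA chunk) (d.getD (pvCatA chunk) 0 + 1) else d)
    PySem.Dict.empty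

-- A's max key: lambda k: (category_counts[k], _CATEGORY_PRIORITY.get(k, 0), k)
def pvKeyA (counts : PySem.Dict String Int) (k : String) : Lex (Int × Lex (Int × List Char)) :=
  toLex (counts.getD k 0, toLex (pvCatPriority.getD k 0, k.toList))

def keyword_dispatch_py (retrieved : List (List (String × List (String × String)))) : String :=
  let category_counts := pvCountsA retrieved
  if category_counts.items = [] then "host"
  else
    match PySem.List.max? category_counts.keys (pvKeyA category_counts) with
    | some dominant => pvCatToAgent.getD dominant "host"
    | none => "host"   -- unreachable (the dict is nonempty); totality guard only

-- ===== PORT B =====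
def pvCatB (chunk : List (String × List (String × String))) : String :=
  (PySem.Dict.mk ((PySem.Dict.mk chunk).getD "metadata" [])).getD "category" ""

-- the run key of Source B: (j - i, _CATEGORY_PRIORITY.get(cats[i], 0), cats[i]); best_key starts at (0, 0, "")
def pvRunKey (run : Int) (c : String) : Lex (Int × Lex (Int × List Char)) :=
  toLex (run, toLex (pvCatPriority.getD c 0, c.toList))

-- Source B's while loop over the runs of the sorted list: the head's run is its takeWhile
-- block (cats[i..j-1]); the scan continues on the dropWhile remainder.
def pvScan : List String → Lex (Int × Lex (Int × List Char)) → Option String → Option String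
  | [], _, best => best
  | x :: xs, bestKey, best =>
      let key := pvRunKey ((xs.takeWhile (fun y => y == x)).length + 1 : Int) x
      let rest := xs.dropWhile (fun y => y == x)
      if bestKey < key then pvScan rest key (some x) else pvScan rest bestKey best
  termination_by l _ _ => l.length
  decreasing_by
    all_goals simpa using Nat.lt_succ_of_le (List.length_dropWhile_le (fun y => y == x) xs)

def keyword_dispatch_py_alt (retrieved : List (List (String × List (String × String)))) : String :=
  let cats := @PySem.List.sorted String (List Char) List.instLinearOrder.toLT LinearOrder.toDecidableLT
    ((retrieved.map pvCatB).filter (fun c => !(c == ""))) (fun s => s.toList) false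
  if cats = [] then "host"
  else
    match pvScan cats (pvRunKey 0 "") none with
    | some best => pvCatToAgent.getD best "host"
    | none => "host"   -- unreachable (the first run always beats the (0,0,"") start); totality guard only

-- ===== PRECONDITION & SPEC =====
def Spec_keyword_dispatch_py (retrieved : List (List (String × List (String × String)))) (out : String) : Prop := out = keyword_dispatch_py_alt retrieved
instance (retrieved : List (List (String × List (String × String)))) (out : String) : Decidable (Spec_keyword_dispatch_py retrieved out) := by unfold Spec_keyword_dispatch_py; infer_instance

-- ===== CLAIM (what is proved, stated in full; the proofs are below) =====
def Claim_equal_keyword_dispatch_py : Prop := ∀ (retrieved : List (List (String × List (String × String)))), Dom_keyword_dispatch_py retrieved → Spec_keyword_dispatch_py retrieved (keyword_dispatch_py retrieved)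

-- ===== LEMMAS AND PROOFS =====

-- sorted run facts: in a ≤-sorted list the head's run is its takeWhile block
theorem pv_not_mem_rest (x : String) (xs : List String)
    (hs : (x :: xs).Pairwise (fun a b => a.toList ≤ b.toList)) :
    x ∉ xs.dropWhile (fun y => y == x) := by
  intro hx
  have hne : xs.dropWhile (fun y => y == x) ≠ [] := List.ne_nil_of_mem hx
  obtain ⟨z, t, hcons⟩ := List.exists_cons_of_ne_nil hne
  have h0 := List.head_dropWhile_not (fun y => y == x) hne
  rw [hcons] at hx
  simp only [hcons, List.head_cons] at h0
  simp at h0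
  have hsub : (z :: t).Sublist xs := hcons ▸ List.dropWhile_sublist _
  have hxle : ∀ y ∈ xs, x.toList ≤ y.toList := (List.pairwise_cons.mp hs).1
  have hrp : (z :: t).Pairwise (fun a b => a.toList ≤ b.toList) :=
    ((List.pairwise_cons.mp hs).2).sublist hsub
  have hxz : x.toList ≤ z.toList := hxle z (hsub.mem List.mem_cons_self)
  rcases List.mem_cons.mp hx with h | h
  · exact h0 h.symm
  · have hzy : z.toList ≤ x.toList := (List.pairwise_cons.mp hrp).1 x h
    exact h0 (String.toList_inj.mp (le_antisymm hzy hxz))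

theorem pv_run_count (x : String) (xs : List String)
    (hs : (x :: xs).Pairwise (fun a b => a.toList ≤ b.toList)) :
    ((x :: xs).count x : Int) = ((xs.takeWhile (fun y => y == x)).length + 1 : Int) := by
  have h1 : xs = xs.takeWhile (fun y => y == x) ++ xs.dropWhile (fun y => y == x) :=
    List.takeWhile_append_dropWhile.symm
  have h2 : (xs.takeWhile (fun y => y == x)).count x = (xs.takeWhile (fun y => y == x)).length :=
    List.count_eq_length.mpr (fun b hb => by
      have h := List.mem_takeWhile_imp hb; simp at h; exact h.symm)
  have h3 : (xs.dropWhile (fun y => y == x)).count x = 0 :=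
    List.count_eq_zero.mpr (pv_not_mem_rest x xs hs)
  have h4 : (x :: xs).count x = xs.count x + 1 := by simp
  rw [h4]
  conv_lhs => rw [h1]
  rw [List.count_append, h2, h3]
  push_cast; ring

theorem pv_count_rest (x y : String) (xs : List String)
    (hs : (x :: xs).Pairwise (fun a b => a.toList ≤ b.toList))
    (hy : y ∈ xs.dropWhile (fun y => y == x)) :
    (x :: xs).count y = (xs.dropWhile (fun y => y == x)).count y := by
  have hyx : y ≠ x := fun h => pv_not_mem_rest x xs hs (h ▸ hy)
  have h1 : xs = xs.takeWhile (fun y => y == x) ++ xs.dropWhile (fun y => y == x) :=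
    List.takeWhile_append_dropWhile.symm
  have h2 : (xs.takeWhile (fun y => y == x)).count y = 0 :=
    List.count_eq_zero.mpr (fun hmem => by
      have h := List.mem_takeWhile_imp hmem; simp at h; exact hyx h)
  have h3 : (x :: xs).count y = xs.count y := by
    rw [List.count_cons]; simp [Ne.symm hyx]
  rw [h3]; conv_lhs => rw [h1]
  rw [List.count_append, h2]; ring

theorem pv_mem_head_or_rest (x y : String) (xs : List String) (hy : y ∈ x :: xs) :
    y = x ∨ y ∈ xs.dropWhile (fun y => y == x) := by
  rcases List.mem_cons.mp hy with h | h
  · exact Or.inl h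
  · rw [← List.takeWhile_append_dropWhile (p := fun y => y == x) (l := xs)] at h
    rcases List.mem_append.mp h with h | h
    · have h2 := List.mem_takeWhile_imp h; simp at h2; exact Or.inl h2
    · exact Or.inr h

-- the key of an element relative to a list of categories: (count, priority, name)
def pvKeyL (l : List String) (x : String) : Lex (Int × Lex (Int × List Char)) :=
  toLex ((l.count x : Int), toLex (pvCatPriority.getD x 0, x.toList))

-- Source B's sweep returns either its running best (everything in l below bk) or
-- a strict maximiser of the (count, priority, name) key over l
theorem pvScan_spec (n : Nat) : ∀ (l : List String), l.length ≤ n →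
    l.Pairwise (fun a b => a.toList ≤ b.toList) → ∀ (bk : Lex (Int × Lex (Int × List Char))) (b : Option String),
    (pvScan l bk b = b ∧ ∀ y ∈ l, pvKeyL l y ≤ bk)
    ∨ (∃ x, x ∈ l ∧ pvScan l bk b = some x ∧ bk < pvKeyL l x ∧ ∀ y ∈ l, pvKeyL l y ≤ pvKeyL l x) := by
  induction n with
  | zero =>
    intro l hl _ bk b
    have : l = [] := List.eq_nil_of_length_eq_zero (Nat.le_zero.mp hl)
    subst this
    exact Or.inl ⟨by rw [pvScan], by simp⟩
  | succ n ih =>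
    intro l hl hs bk b
    cases l with
    | nil => exact Or.inl ⟨by rw [pvScan], by simp⟩
    | cons x xs =>
      have hxs : xs.Pairwise (fun a b => a.toList ≤ b.toList) := (List.pairwise_cons.mp hs).2
      have hrlen : (xs.dropWhile (fun y => y == x)).length ≤ n := by
        have := List.length_dropWhile_le (fun y => y == x) xs
        simp at hl; omega
      have hrs : (xs.dropWhile (fun y => y == x)).Pairwise (fun a b => a.toList ≤ b.toList) :=
        hxs.sublist (List.dropWhile_sublist _)
      have hkey : pvKeyL (x :: xs) x = pvRunKey ((xs.takeWhile (fun y => y == x)).length + 1 : Int) x := by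
        unfold pvKeyL pvRunKey
        rw [pv_run_count x xs hs]
      have hkrest : ∀ y ∈ xs.dropWhile (fun y => y == x),
          pvKeyL (xs.dropWhile (fun y => y == x)) y = pvKeyL (x :: xs) y := by
        intro y hy
        unfold pvKeyL
        rw [pv_count_rest x y xs hs hy]
      rw [pvScan]
      set key := pvRunKey ((xs.takeWhile (fun y => y == x)).length + 1 : Int) x with hk
      set rest := xs.dropWhile (fun y => y == x) with hr
      by_cases hlt : bk < key
      · rw [if_pos hlt]
        rcases ih rest hrlen hrs key (some x) with ⟨heq, hmax⟩ | ⟨x', hx'm, heq, hgt, hmax⟩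
        · refine Or.inr ⟨x, List.mem_cons_self, heq, ?_, ?_⟩
          · rw [hkey]; exact hlt
          · intro y hy
            rcases pv_mem_head_or_rest x y xs hy with h | h
            · subst h; exact le_refl _
            · rw [hkey]; rw [← hkrest y h]; exact hmax y h
        · refine Or.inr ⟨x', List.mem_cons_of_mem _ (List.dropWhile_sublist _ |>.mem hx'm), heq, ?_, ?_⟩
          · rw [hkrest x' hx'm] at hgt
            exact lt_trans hlt hgt
          · intro y hy
            rcases pv_mem_head_or_rest x y xs hy with h | h
            · subst h
              rw [hkey, ← hkrest x' hx'm]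
              exact le_of_lt hgt
            · rw [← hkrest y h, ← hkrest x' hx'm]; exact hmax y h
      · rw [if_neg hlt]
        have hkle : pvKeyL (x :: xs) x ≤ bk := by rw [hkey]; exact le_of_not_gt hlt
        rcases ih rest hrlen hrs bk b with ⟨heq, hmax⟩ | ⟨x', hx'm, heq, hgt, hmax⟩
        · refine Or.inl ⟨heq, ?_⟩
          intro y hy
          rcases pv_mem_head_or_rest x y xs hy with h | h
          · subst h; exact hkle
          · rw [← hkrest y h]; exact hmax y h
        · refine Or.inr ⟨x', List.mem_cons_of_mem _ (List.dropWhile_sublist _ |>.mem hx'm), heq, ?_, ?_⟩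
          · rw [hkrest x' hx'm] at hgt; exact hgt
          · intro y hy
            rcases pv_mem_head_or_rest x y xs hy with h | h
            · subst h
              rw [← hkrest x' hx'm]
              exact le_trans hkle (le_of_lt (hkrest x' hx'm ▸ hgt))
            · rw [← hkrest y h, ← hkrest x' hx'm]; exact hmax y h

-- the common list of (nonempty) categories of the retrieved chunks
def pvCats (retrieved : List (List (String × List (String × String)))) : List String :=
  (retrieved.map pvCatA).filter (fun c => !(c == ""))

-- A's counting loop is Counter(pvCats retrieved)
theorem pvCountsA_eq_counter (retrieved : List (List (String × List (String × String)))) :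
    pvCountsA retrieved = PySem.Dict.counter (pvCats retrieved) := by
  unfold pvCountsA pvCats
  rw [PySem.List.foldl_ite_eq_foldl_filter
      (fun chunk : List (String × List (String × String)) => pvCatA chunk ≠ "")
      (fun (d : PySem.Dict String Int) chunk => d.insert (pvCatA chunk) (d.getD (pvCatA chunk) 0 + 1))
      retrieved PySem.Dict.empty]
  rw [← List.foldl_map (f := pvCatA)
        (g := fun (d : PySem.Dict String Int) k => d.insert k (d.getD k 0 + 1))]
  rw [PySem.Dict.foldl_insert_getD_add_one_eq_counter]
  rw [List.filter_map]
  congr 1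
  exact congrArg (List.map pvCatA)
    (List.filter_congr (fun x _ => by
      simp only [Function.comp_apply, ne_eq, decide_not, ← Bool.beq_eq_decide_eq]))

theorem pvCats_eq_B (retrieved : List (List (String × List (String × String)))) :
    (retrieved.map pvCatB).filter (fun c => !(c == "")) = pvCats retrieved := rfl

theorem keyword_dispatch_eq (retrieved : List (List (String × List (String × String)))) :
    keyword_dispatch_py retrieved = keyword_dispatch_py_alt retrieved := by
  unfold keyword_dispatch_py keyword_dispatch_py_alt
  rw [pvCountsA_eq_counter, pvCats_eq_B]
  set cs := pvCats retrieved with hcs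
  by_cases hnil : cs = []
  · rw [hnil]; rfl
  · have hitems : (PySem.Dict.counter cs).items ≠ [] := by
      intro h
      have hk : (PySem.Dict.counter cs).keys = [] := by
        simp [PySem.Dict.keys, h]
      rw [PySem.Dict.keys_counter] at hk
      obtain ⟨c, t, hct⟩ := List.exists_cons_of_ne_nil hnil
      have : c ∈ PySem.Set.ofList cs := by
        rw [PySem.Set.mem_ofList]
        rw [hct]; exact List.mem_cons_self
      rw [hk] at this
      exact List.not_mem_nil this
    have hsnil : @PySem.List.sorted String (List Char) List.instLinearOrder.toLT LinearOrder.toDecidableLT cs (fun s => s.toList) false ≠ [] := by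
      intro h
      exact hnil ((@PySem.List.sorted_eq_nil_iff String (List Char) List.instLinearOrder.toLT LinearOrder.toDecidableLT cs (fun s => s.toList) false).mp h)
    rw [if_neg hitems, if_neg hsnil]
    -- A's winner
    cases hK : PySem.List.max? (PySem.Dict.counter cs).keys (pvKeyA (PySem.Dict.counter cs)) with
    | none =>
      have hkeysnil := (PySem.List.max?_eq_none_iff _ _).mp hK
      rw [PySem.Dict.keys_counter] at hkeysnil
      obtain ⟨c, t, hct⟩ := List.exists_cons_of_ne_nil hnil
      have hm : c ∈ PySem.Set.ofList cs := by
        rw [PySem.Set.mem_ofList, hct]; exact List.mem_cons_self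
      rw [hkeysnil] at hm
      exact absurd hm List.not_mem_nil
    | some w =>
    have hwmem : w ∈ (PySem.Dict.counter cs).keys := PySem.List.max?_mem hK
    have hwmax := PySem.List.max?_isMax hK
    -- A's key is the (count, priority, name) key
    have hKA : ∀ k : String, pvKeyA (PySem.Dict.counter cs) k = pvKeyL cs k := by
      intro k
      unfold pvKeyA pvKeyL
      rw [PySem.Dict.getD_counter]
    have hwcs : w ∈ cs := by
      rw [PySem.Dict.keys_counter, PySem.Set.mem_ofList] at hwmem
      exact hwmem
    have hwmax' : ∀ y ∈ cs, pvKeyL cs y ≤ pvKeyL cs w := by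
      intro y hy
      have hyk : y ∈ (PySem.Dict.counter cs).keys := by
        rw [PySem.Dict.keys_counter, PySem.Set.mem_ofList]; exact hy
      have h := hwmax y hyk
      rwa [hKA, hKA] at h
    -- B's winner via the sweep
    set l := @PySem.List.sorted String (List Char) List.instLinearOrder.toLT LinearOrder.toDecidableLT cs (fun s => s.toList) false with hl
    have hperm : l.Perm cs := by
      rw [hl]
      exact @PySem.List.sorted_perm String (List Char) List.instLinearOrder.toLT LinearOrder.toDecidableLT cs (fun s => s.toList) false
    have hsorted : l.Pairwise (fun a b => a.toList ≤ b.toList) := by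
      rw [hl]; exact PySem.List.sorted_pairwise cs (fun s => s.toList)
    have hKL : ∀ y : String, pvKeyL l y = pvKeyL cs y := by
      intro y
      unfold pvKeyL
      rw [hperm.count_eq]
    have hlnil : l ≠ [] := by rw [hl]; exact hsnil
    rcases pvScan_spec l.length l (le_refl _) hsorted (pvRunKey 0 "") none with ⟨_, hmax⟩ | ⟨w', hw'm, heq, _, hmax⟩
    · -- impossible: l is nonempty and every real key has count ≥ 1 > 0
      exfalso
      obtain ⟨c, t, hct⟩ := List.exists_cons_of_ne_nil hlnil
      have hcmem : c ∈ l := by rw [hct]; exact List.mem_cons_self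
      have h := hmax c hcmem
      have hcount : 1 ≤ l.count c := List.one_le_count_iff.mpr hcmem
      unfold pvKeyL pvRunKey at h
      rw [Prod.Lex.le_iff] at h
      rcases h with h | ⟨h, _⟩
      · simp at h; omega
      · simp at h; omega
    · rw [heq]
      -- the two winners carry equal keys, hence are equal (the name is a key component)
      have hw'cs : w' ∈ cs := hperm.mem_iff.mp hw'm
      have h1 : pvKeyL cs w ≤ pvKeyL cs w' := by
        have h := hmax w (hperm.mem_iff.mpr hwcs)
        rwa [hKL, hKL] at h
      have h2 : pvKeyL cs w' ≤ pvKeyL cs w := hwmax' w' hw'cs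
      have heqk : pvKeyL cs w' = pvKeyL cs w := le_antisymm h2 h1
      unfold pvKeyL at heqk
      have hp1 := toLex.injective heqk
      have hp2 := toLex.injective (congrArg Prod.snd hp1)
      have hww' : w' = w := String.toList_inj.mp (congrArg Prod.snd hp2)
      rw [hww']

-- ===== VERDICT (by name: the statement is the Claim_ definition above) =====
theorem keyword_dispatch_py_spec : Claim_equal_keyword_dispatch_py := by
  intro retrieved _
  unfold Spec_keyword_dispatch_py
  exact keyword_dispatch_eq retrieved
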